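-- pv_equiv track=rewrite | github.com/Darkhunter9/python | Texas Referee.py | sixth
-- ===== SOURCE A (Python) =====
-- from itertools import combinations
--
-- def sixth(cardlist):
--     for i in combinations(cardlist,3):
--         result = []
--         if all(i[j][0] == i[j+1][0] for j in range(2)):
--             result = list(i)
--             for j in cardlist:
--                 if j not in i:
--                     result.append(j)
--             return result
--     return None
-- ===== SOURCE B (Python) =====
-- def sixth(cardlist):
--     groups = {}
--     for c in cardlist:
--         groups.setdefault(c[0], []).append(c)
--     for cards in groups.values():
--         if len(cards) >= 3:
--             triple = cards[:3]
--             return triple + [c for c in cardlist if c not in triple]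
--     return None
-- ===== Notes on version B (the rewrite author's own statement) =====
-- stated objective: alternative
-- what changed: Replaced the scan over all C(n,3) combinations with a single group-by-rank pass over the cardlist (an insertion-ordered dict rank -> cards), then a scan of the groups for the first one of size >= 3.
-- outside the precondition, e.g. on sixth([[1], [1], [1], []]): A returns [[1], [1], [1], []], B raises IndexError
import Mathlib
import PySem

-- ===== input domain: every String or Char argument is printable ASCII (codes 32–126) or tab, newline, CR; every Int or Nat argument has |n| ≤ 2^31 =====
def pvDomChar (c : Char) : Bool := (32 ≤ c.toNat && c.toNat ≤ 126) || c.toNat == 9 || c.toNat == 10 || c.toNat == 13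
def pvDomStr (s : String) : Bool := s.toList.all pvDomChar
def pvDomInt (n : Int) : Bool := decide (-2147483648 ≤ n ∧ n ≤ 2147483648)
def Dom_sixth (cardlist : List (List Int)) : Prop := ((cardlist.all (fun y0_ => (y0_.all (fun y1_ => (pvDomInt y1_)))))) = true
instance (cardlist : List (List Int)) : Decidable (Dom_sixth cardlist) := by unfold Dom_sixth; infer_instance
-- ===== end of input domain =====

-- B replaces A's scan over all C(n,3) index combinations by one group-by-rank pass
-- (insertion-ordered dict) plus a scan of the groups for the first of size ≥ 3.

-- ===== PORT A =====
-- 'all(i[j][0] == i[j+1][0] for j in range(2))'; i[j][0] is ported with the total pyGetD —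
-- exact under Pre_sixth (no empty card, so no IndexError is reachable).
def sixthCheck (t : List (List Int)) : Bool :=
  (PySem.List.pyRange 0 2 1).all (fun j =>
    PySem.List.pyGetD (PySem.List.pyGetD t j []) 0 0 ==
    PySem.List.pyGetD (PySem.List.pyGetD t (j + 1) []) 0 0)

-- 'for i in combinations(cardlist, 3): … return result' / fall through to 'return None'
def sixthLoop (cardlist : List (List Int)) : List (List (List Int)) → Option (List (List Int))
  | [] => none
  | t :: rest =>
    if sixthCheck t then
      -- result = list(i); for j in cardlist: if j not in i: result.append(j)
      some (cardlist.foldl (fun result j => if !(t.contains j) then result ++ [j] else result) t)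
    else sixthLoop cardlist rest

def sixth (cardlist : List (List Int)) : Option (List (List Int)) :=
  sixthLoop cardlist (PySem.List.combinations cardlist 3)

-- ===== PORT B =====
-- 'for cards in groups.values(): if len(cards) >= 3: …' / fall through to 'return None'
def sixthAltScan (cardlist : List (List Int)) : List (List (List Int)) → Option (List (List Int))
  | [] => none
  | cards :: rest =>
    if 3 ≤ cards.length then
      let triple := PySem.List.slice cards none (some 3)   -- cards[:3]
      some (triple ++ cardlist.filter (fun c => !(triple.contains c)))
    else sixthAltScan cardlist rest

def sixth_alt (cardlist : List (List Int)) : Option (List (List Int)) :=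
  -- groups = {}; for c in cardlist: groups.setdefault(c[0], []).append(c)
  let groups := cardlist.foldl
    (fun d c => d.modify (PySem.List.pyGetD c 0 0) [] (· ++ [c])) PySem.Dict.empty
  sixthAltScan cardlist (PySem.Dict.values groups)

-- ===== PRECONDITION & SPEC =====
-- Pre_ excludes cardlists containing an empty card: there A's i[j][0] raises IndexError on some
-- inputs and on others accidentally returns before reaching the empty card, while B (which keys
-- every card by card[0]) always raises IndexError.
def Pre_sixth (cardlist : List (List Int)) : Prop := ∀ c ∈ cardlist, c ≠ []
instance (cardlist : List (List Int)) : Decidable (Pre_sixth cardlist) := by unfold Pre_sixth; infer_instance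

def pvWitness_sixth : List (List Int) := [[1, 0], [1, 1], [2, 0]]

def Spec_sixth (cardlist : List (List Int)) (out : Option (List (List Int))) : Prop := out = sixth_alt cardlist
instance (cardlist : List (List Int)) (out : Option (List (List Int))) : Decidable (Spec_sixth cardlist out) := by unfold Spec_sixth; infer_instance

-- ===== CLAIM (what is proved, stated in full; the proofs are below) =====
def Claim_equal_sixth : Prop := ∀ (cardlist : List (List Int)), Dom_sixth cardlist → Pre_sixth cardlist → Spec_sixth cardlist (sixth cardlist)

-- ===== LEMMAS AND PROOFS =====

-- the rank of a card, as both ports compute it (card[0], total form)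
def rk (c : List Int) : Int := PySem.List.pyGetD c 0 0

theorem check_cons3 (a b c : List Int) :
    sixthCheck [a, b, c] = ((rk a == rk b) && (rk b == rk c)) := by
  have h : PySem.List.pyRange 0 2 1 = [0, 1] := by decide
  unfold sixthCheck
  rw [h]
  simp [rk, PySem.List.pyGetD, PySem.List.pyGet?, PySem.List.pyIdx?]

theorem beq_chain (r a b : Int) : ((r == a) && (a == b)) = ((a == r) && (b == r)) := by
  by_cases h : r = a
  · simp [h, eq_comm]
  · have h2 : ¬ a = r := fun hh => h hh.symm
    rw [beq_eq_false_iff_ne.mpr h, beq_eq_false_iff_ne.mpr h2]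
    simp

theorem find?_congr_mem {α : Type} (l : List α) (p q : α → Bool) (h : ∀ a ∈ l, p a = q a) :
    l.find? p = l.find? q := by
  induction l with
  | nil => rfl
  | cons a t ih =>
    have ha := h a (by simp)
    by_cases hp : p a
    · rw [List.find?_cons_of_pos hp, List.find?_cons_of_pos (ha ▸ hp)]
    · rw [List.find?_cons_of_neg (by simp [hp]), List.find?_cons_of_neg (by simp [← ha, hp]),
        ih (fun a ha => h a (by simp [ha]))]

theorem find?_filter_ne (x : Int) (Q : Int → Bool) (hx : Q x = false) (s : List Int) :
    (s.filter (fun y => y != x)).find? Q = s.find? Q := by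
  induction s with
  | nil => rfl
  | cons a t ih =>
    by_cases ha : a = x
    · subst ha
      rw [List.filter_cons_of_neg (by simp), ih, List.find?_cons_of_neg (by simp [hx])]
    · rw [List.filter_cons_of_pos (by simp [ha])]
      by_cases hq : Q a
      · rw [List.find?_cons_of_pos hq, List.find?_cons_of_pos hq]
      · rw [List.find?_cons_of_neg (by simp [hq]), List.find?_cons_of_neg (by simp [hq]), ih]

-- find? over the distinct-elements list sees the same first hit as over the raw list
theorem find?_ofList (Q : Int → Bool) (m : List Int) :
    (PySem.Set.ofList m).find? Q = m.find? Q := by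
  induction m with
  | nil => rfl
  | cons x t ih =>
    rw [PySem.Set.ofList_cons]
    by_cases hq : Q x
    · rw [List.find?_cons_of_pos hq, List.find?_cons_of_pos hq]
    · have hx : Q x = false := by simpa using hq
      rw [List.find?_cons_of_neg (by simp [hq]), List.find?_cons_of_neg (by simp [hq])]
      show (PySem.Set.discard _ x).find? Q = _
      rw [show PySem.Set.discard (PySem.Set.ofList t) x = (PySem.Set.ofList t).filter (fun y => y != x) from rfl,
        find?_filter_ne x Q hx, ih]

-- A's check on the 2-combination tail, with the head's rank fixed
def q2 (r : Int) (p : List (List Int)) : Bool :=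
  match p with
  | [b, c] => (rk b == r) && (rk c == r)
  | _ => false

-- the first pair of rank-r cards among the 2-combinations is the first two rank-r cards
theorem find?_comb2 (r : Int) (xs : List (List Int)) :
    (PySem.List.combinations xs 2).find? (q2 r) =
      (if 2 ≤ xs.countP (fun c => rk c == r) then some ((xs.filter (fun c => rk c == r)).take 2)
       else none) := by
  induction xs with
  | nil => rfl
  | cons y ys ih =>
    have hc : PySem.List.combinations (y :: ys) 2 = ys.map (fun c => [y, c]) ++ PySem.List.combinations ys 2 := by
      rw [show (2:Nat) = 1 + 1 from rfl, PySem.List.combinations_cons_succ,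
        PySem.List.combinations_one, List.map_map]
      rfl
    rw [hc, List.find?_append, List.find?_map]
    simp only [Function.comp_def]
    by_cases hy : rk y == r
    · have hpred : ∀ c, (q2 r [y, c]) = (fun c => rk c == r) c := by
        intro c; simp [q2, hy]
      rw [find?_congr_mem _ _ _ (fun a _ => hpred a), ← List.head?_filter]
      rcases hfil : ys.filter (fun c => rk c == r) with _ | ⟨b, l⟩
      · have hcnt : ys.countP (fun c => rk c == r) = 0 := by
          rw [List.countP_eq_length_filter, hfil]; rfl
        simp only [List.head?_nil, Option.map_none, Option.none_or, ih]
        rw [List.countP_cons, List.filter_cons]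
        simp [hy, hcnt]
      · have hcnt : 1 ≤ ys.countP (fun c => rk c == r) := by
          rw [List.countP_eq_length_filter, hfil]; simp
        rw [List.countP_cons, List.filter_cons]
        simp only [hy, if_pos, List.head?_cons, Option.map_some, Option.some_or]
        rw [if_pos (by omega), hfil]
        simp
    · have hpred : ∀ c, (q2 r [y, c]) = false := by
        intro c; simp [q2, hy]
      rw [find?_congr_mem _ _ (fun _ => false) (fun a _ => hpred a)]
      rw [List.find?_eq_none.mpr (by simp), Option.map_none, Option.none_or, ih,
        List.countP_cons, List.filter_cons]
      simp [hy]

-- A's combination scan finds the first card whose rank occurs ≥ 3 times; the triple is the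
-- first three cards of that rank
theorem find?_comb3 (cl : List (List Int)) :
    ((PySem.List.combinations cl 3).find? sixthCheck) =
      (cl.find? (fun c => 3 ≤ cl.countP (fun d => rk d == rk c))).map
        (fun c => (cl.filter (fun d => rk d == rk c)).take 3) := by
  induction cl with
  | nil => rfl
  | cons x xs ih =>
    have hc : PySem.List.combinations (x :: xs) 3 =
        (PySem.List.combinations xs 2).map (x :: ·) ++ PySem.List.combinations xs 3 := by
      rw [show (3:Nat) = 2 + 1 from rfl, PySem.List.combinations_cons_succ]
    rw [hc, List.find?_append, List.find?_map]
    have hbridge : ∀ p ∈ PySem.List.combinations xs 2,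
        (sixthCheck ∘ (x :: ·)) p = q2 (rk x) p := by
      intro p hp
      have hlen : p.length = 2 := PySem.List.length_of_mem_combinations hp
      obtain ⟨b, c, rfl⟩ := List.length_eq_two.mp hlen
      show sixthCheck [x, b, c] = _
      rw [check_cons3, beq_chain]
      rfl
    rw [find?_congr_mem _ _ _ hbridge, find?_comb2]
    by_cases hcnt : 2 ≤ xs.countP (fun c => rk c == rk x)
    · rw [if_pos hcnt, Option.map_some]
      have hx : (3 ≤ (x :: xs).countP (fun d => rk d == rk x)) := by
        rw [List.countP_cons]
        simp only [BEq.rfl, if_pos]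
        have : xs.countP (fun d => rk d == rk x) = xs.countP (fun c => rk c == rk x) := rfl
        omega
      rw [List.find?_cons_of_pos (by simpa using hx), Option.some_or, Option.map_some]
      congr 1
      rw [List.filter_cons_of_pos (by simp)]
      rfl
    · rw [if_neg hcnt, Option.map_none, Option.none_or]
      have hle : xs.countP (fun c => rk c == rk x) ≤ 1 := by omega
      have hx : ¬ (3 ≤ (x :: xs).countP (fun d => rk d == rk x)) := by
        rw [List.countP_cons]
        simp only [BEq.rfl, if_pos]
        have : xs.countP (fun d => rk d == rk x) = xs.countP (fun c => rk c == rk x) := rfl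
        omega
      rw [List.find?_cons_of_neg (by simpa using hx), ih]
      -- the two count predicates agree on every member of xs
      have hpred : ∀ c ∈ xs, (fun c => decide (3 ≤ xs.countP (fun d => rk d == rk c))) c
          = (fun c => decide (3 ≤ (x :: xs).countP (fun d => rk d == rk c))) c := by
        intro c _
        by_cases hcx : rk c = rk x
        · have h1 : xs.countP (fun d => rk d == rk c) = xs.countP (fun d => rk d == rk x) := by
            congr 1; funext d; rw [hcx]
          have h2 : (x :: xs).countP (fun d => rk d == rk c) ≤ 2 := by
            rw [List.countP_cons, h1]
            have hb : (rk x == rk c) = true := by simp [hcx]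
            simp only [hb, if_pos]
            have : xs.countP (fun d => rk d == rk x) = xs.countP (fun c => rk c == rk x) := rfl
            omega
          have h3 : xs.countP (fun d => rk d == rk c) ≤ 1 := by rw [h1]; exact hle
          simp only [decide_eq_decide]
          omega
        · have hb : (rk x == rk c) = false :=
            beq_eq_false_iff_ne.mpr (fun hh => hcx hh.symm)
          simp [hb]
      rw [← find?_congr_mem _ _ _ hpred]
      rcases hfind : xs.find? (fun c => decide (3 ≤ xs.countP (fun d => rk d == rk c))) with _ | c
      · rfl
      · have hPc : 3 ≤ xs.countP (fun d => rk d == rk c) := by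
          have := List.find?_some hfind
          simpa using this
        have hcx : rk c ≠ rk x := by
          intro hcx
          have h1 : xs.countP (fun d => rk d == rk c) = xs.countP (fun c => rk c == rk x) := by
            congr 1; funext d; rw [hcx]
          omega
        rw [Option.map_some, Option.map_some]
        congr 1
        rw [List.filter_cons_of_neg (by simp [beq_eq_false_iff_ne.mpr (fun hh => hcx hh.symm)])]

theorem sixthLoop_eq (cl : List (List Int)) (ts : List (List (List Int))) :
    sixthLoop cl ts = (ts.find? sixthCheck).map
      (fun t => t ++ cl.filter (fun j => !(t.contains j))) := by
  induction ts with
  | nil => rfl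
  | cons t rest ih =>
    rw [sixthLoop]
    by_cases h : sixthCheck t
    · rw [if_pos h, List.find?_cons_of_pos h, Option.map_some]
      rw [PySem.List.foldl_append_if_eq_filter]
    · rw [if_neg h, List.find?_cons_of_neg (by simp [h]), ih]

theorem slice_to_three {α : Type} (g : List α) : PySem.List.slice g none (some 3) = g.take 3 := by
  exact_mod_cast PySem.List.slice_to_natCast (xs := g) (b := 3)

theorem scan_eq (cl : List (List Int)) (gs : List (List (List Int))) :
    sixthAltScan cl gs = (gs.find? (fun g => decide (3 ≤ g.length))).map
      (fun g => g.take 3 ++ cl.filter (fun c => !((g.take 3).contains c))) := by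
  induction gs with
  | nil => rfl
  | cons g rest ih =>
    rw [sixthAltScan]
    by_cases h : 3 ≤ g.length
    · rw [if_pos h, List.find?_cons_of_pos (by simpa using h), Option.map_some]
      simp only [slice_to_three]
    · rw [if_neg h, List.find?_cons_of_neg (by simpa using h), ih]

-- B's dict holds, in first-occurrence order of the ranks, the rank-r cards for each rank r
theorem values_groups (cl : List (List Int)) :
    PySem.Dict.values (cl.foldl (fun d c => d.modify (PySem.List.pyGetD c 0 0) [] (· ++ [c])) PySem.Dict.empty)
      = (PySem.Set.ofList (cl.map rk)).map (fun r => cl.filter (fun c => rk c == r)) := by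
  set groups := cl.foldl (fun d c => d.modify (PySem.List.pyGetD c 0 0) [] (· ++ [c])) PySem.Dict.empty with hg
  have hnd : groups.keys.Nodup := by
    rw [hg]
    exact PySem.Dict.nodup_keys_foldl_modify_key cl (fun c => PySem.List.pyGetD c 0 0) []
      (fun d x => (· ++ [x])) PySem.Dict.empty (by simp [PySem.Dict.keys_empty])
  have hkeys : groups.keys = PySem.Set.ofList (cl.map rk) := by
    rw [hg, PySem.Dict.keys_foldl_modify_key]
    rw [show (PySem.Dict.empty : PySem.Dict Int (List (List Int))).keys = [] from rfl]
    rw [PySem.Set.update_nil_left]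
    rfl
  have hget : ∀ r, groups.getD r [] = cl.filter (fun c => rk c == r) := by
    intro r
    have h2 : groups = (cl.map (fun c => (rk c, c))).foldl
        (fun d p => d.modify p.1 [] (· ++ [p.2])) PySem.Dict.empty := by
      rw [hg, List.foldl_map]; rfl
    rw [h2, PySem.Dict.getD_foldl_modify_append, PySem.Dict.getD_empty, List.nil_append,
      List.filter_map, List.map_map]
    simp [Function.comp_def, rk]
  rw [PySem.Dict.values_eq_map_keys groups hnd [], hkeys]
  exact List.map_congr_left (fun r _ => hget r)

theorem sixth_alt_eq (cl : List (List Int)) :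
    sixth_alt cl = (cl.find? (fun c => 3 ≤ cl.countP (fun d => rk d == rk c))).map
      (fun c =>
        let t := (cl.filter (fun d => rk d == rk c)).take 3
        t ++ cl.filter (fun j => !(t.contains j))) := by
  show sixthAltScan cl _ = _
  rw [values_groups, scan_eq, List.find?_map, Option.map_map, find?_ofList, List.find?_map,
    Option.map_map]
  simp only [Function.comp_def]
  have hpred : ∀ c ∈ cl, (fun c => decide (3 ≤ (cl.filter (fun d => rk d == rk c)).length)) c
      = (fun c => decide (3 ≤ cl.countP (fun d => rk d == rk c))) c := by
    intro c _
    simp [List.countP_eq_length_filter]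
  rw [find?_congr_mem _ _ _ hpred]

-- ===== VERDICT (by name: the statement is the Claim_ definition above) =====
theorem sixth_spec : Claim_equal_sixth := by
  intro cl _ _
  show sixth cl = sixth_alt cl
  rw [sixth, sixthLoop_eq, find?_comb3, sixth_alt_eq, Option.map_map]
  rfl
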